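-- pv_equiv track=rewrite | github.com/Allinonelearning/Bioinformatics_learning | Python_learning/learning.py | clustalw
-- ===== SOURCE A (Python) =====
-- def clustalw(sequences, match=1, mismatch=-1, gap=-1):
--     alignment = [list(seq) for seq in sequences]
--     # Perform pairwise alignments
--     while len(alignment) > 1:
--         scores = []
--         for i in range(len(alignment)):
--             for j in range(i+1, len(alignment)):
--                 score = sum(a == b for a, b in zip(alignment[i], alignment[j]))
--                 scores.append((i, j, score))
--         i, j, _ = max(scores, key=lambda x: x[2])
--         merged_seq = []
--         for a, b in zip(alignment[i], alignment[j]):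
--             if a == b:
--                 merged_seq.append(a)
--             else:
--                 merged_seq.append("-")
--         alignment[i] = merged_seq
--         alignment.pop(j)
--     return "".join(alignment[0])
-- ===== SOURCE B (Python) =====
-- def pair_score(s, t):
--     return sum(a == b for a, b in zip(s, t))
--
--
-- def clustalw(sequences, match=1, mismatch=-1, gap=-1):
--     # entries pairs each sequence with a stable id; cache holds every pairwise
--     # score (both key orders) so each round costs O(n^2) lookups instead of
--     # O(n^2 * L) recomputation; only scores against the merged sequence are
--     # recomputed.
--     entries = []
--     cache = {}
--     nxt = 0
--     for s in sequences:
--         seq = list(s)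
--         for rid, rseq in entries:
--             if rid != nxt:
--                 sc = pair_score(seq, rseq)
--                 cache[(nxt, rid)] = sc
--                 cache[(rid, nxt)] = sc
--         entries.append((nxt, seq))
--         nxt += 1
--     while len(entries) > 1:
--         best = None
--         for p in range(len(entries)):
--             for q in range(p + 1, len(entries)):
--                 s = cache[(entries[p][0], entries[q][0])]
--                 if best is None or best[2] < s:
--                     best = (p, q, s)
--         p, q, _ = best
--         merged = [a if a == b else "-" for a, b in zip(entries[p][1], entries[q][1])]
--         entries[p] = (nxt, merged)
--         del entries[q]
--         for rid, rseq in entries: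
--             if rid != nxt:
--                 sc = pair_score(merged, rseq)
--                 cache[(nxt, rid)] = sc
--                 cache[(rid, nxt)] = sc
--         nxt += 1
--     return "".join(entries[0][1])
-- ===== Notes on version B (the rewrite author's own statement) =====
-- stated objective: faster
-- what changed: B gives each sequence a stable id and caches every pairwise match-count in a dict, so each merge round does O(n^2) dict lookups and recomputes only the n-1 scores against the newly merged sequence, instead of A's recomputation of all O(n^2) pairwise scores over length-L sequences every round.
import Mathlib
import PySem

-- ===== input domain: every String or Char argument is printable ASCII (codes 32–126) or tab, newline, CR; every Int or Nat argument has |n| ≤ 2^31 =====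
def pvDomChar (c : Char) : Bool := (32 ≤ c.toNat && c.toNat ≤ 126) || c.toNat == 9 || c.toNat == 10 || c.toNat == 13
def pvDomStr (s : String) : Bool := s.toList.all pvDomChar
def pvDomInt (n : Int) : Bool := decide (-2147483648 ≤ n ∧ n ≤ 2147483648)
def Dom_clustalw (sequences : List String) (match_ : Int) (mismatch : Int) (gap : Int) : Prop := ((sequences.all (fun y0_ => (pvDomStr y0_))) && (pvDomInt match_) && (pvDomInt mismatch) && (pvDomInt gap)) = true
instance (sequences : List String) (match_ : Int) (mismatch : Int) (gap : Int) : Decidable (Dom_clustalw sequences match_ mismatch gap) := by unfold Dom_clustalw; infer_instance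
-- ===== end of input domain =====

-- B caches all pairwise match-counts in a dict keyed by stable sequence ids and, after each
-- merge, recomputes only the scores against the merged sequence (objective: faster; measured).
-- Pre_ excludes only the empty input list, on which A raises IndexError (alignment[0]).

-- ===== PORT A =====
def aScores (al : List (List Char)) : List (Nat × Nat × Int) :=
  (List.range al.length).foldl (fun sc i =>
    (List.range' (i+1) (al.length - (i+1))).foldl (fun sc j =>
      sc ++ [(i, j, (((al.getD i []).zip (al.getD j [])).map
        (fun ab => if ab.1 = ab.2 then (1 : Int) else 0)).sum)]) sc) []

def aStep (al : List (List Char)) : List (List Char) :=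
  match PySem.List.max? (aScores al) (fun x => x.2.2) with
  | none => al
  | some (i, j, _) =>
    let merged := ((al.getD i []).zip (al.getD j [])).map (fun ab => if ab.1 = ab.2 then ab.1 else '-')
    (al.set i merged).eraseIdx j

def aLoop : Nat → List (List Char) → List (List Char)
  | 0, al => al
  | f+1, al => if al.length ≤ 1 then al else aLoop f (aStep al)

def clustalw (sequences : List String) (match_ : Int) (mismatch : Int) (gap : Int) : String :=
  let alignment := sequences.map (fun s => s.toList)
  String.ofList ((aLoop alignment.length alignment).getD 0 [])

-- ===== PORT B =====
def pairScoreB (s t : List Char) : Int :=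
  ((s.zip t).map (fun ab => if ab.1 = ab.2 then (1 : Int) else 0)).sum

def refresh (nid : Int) (seq : List Char) (entries : List (Int × List Char))
    (c : PySem.Dict (Int × Int) Int) : PySem.Dict (Int × Int) Int :=
  entries.foldl (fun c r =>
    if r.1 = nid then c
    else
      let sc := pairScoreB seq r.2
      (c.insert (nid, r.1) sc).insert (r.1, nid) sc) c

abbrev BState : Type := List (Int × List Char) × PySem.Dict (Int × Int) Int × Int

def bInit (sequences : List String) : BState :=
  sequences.foldl (fun st s =>
    let seq := s.toList
    let c := refresh st.2.2 seq st.1 st.2.1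
    (st.1 ++ [(st.2.2, seq)], c, st.2.2 + 1)) ([], PySem.Dict.empty, 0)

def pairsIdx (n : Nat) : List (Nat × Nat) :=
  (List.range n).flatMap (fun p => (List.range' (p+1) (n-(p+1))).map (fun q => (p, q)))

def bestPair (entries : List (Int × List Char)) (cache : PySem.Dict (Int × Int) Int) :
    Option (Nat × Nat × Int) :=
  (pairsIdx entries.length).foldl
    (fun best pq =>
      let s := cache.getD ((entries.getD pq.1 (0, [])).1, (entries.getD pq.2 (0, [])).1) 0
      match best with
      | none => some (pq.1, pq.2, s)
      | some b => if b.2.2 < s then some (pq.1, pq.2, s) else some b) none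

def bStep (st : BState) : BState :=
  match bestPair st.1 st.2.1 with
  | none => st
  | some (p, q, _) =>
    let merged := (((st.1.getD p (0, [])).2).zip ((st.1.getD q (0, [])).2)).map
        (fun ab => if ab.1 = ab.2 then ab.1 else '-')
    let entries' := (st.1.set p (st.2.2, merged)).eraseIdx q
    (entries', refresh st.2.2 merged entries' st.2.1, st.2.2 + 1)

def bLoop : Nat → BState → BState
  | 0, st => st
  | f+1, st => if st.1.length ≤ 1 then st else bLoop f (bStep st)

def clustalw_alt (sequences : List String) (match_ : Int) (mismatch : Int) (gap : Int) : String :=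
  let st := bLoop (bInit sequences).1.length (bInit sequences)
  String.ofList ((st.1.getD 0 (0, [])).2)

-- ===== PRECONDITION & SPEC =====
def Pre_clustalw (sequences : List String) (match_ : Int) (mismatch : Int) (gap : Int) : Prop :=
  sequences ≠ []
instance (sequences : List String) (match_ : Int) (mismatch : Int) (gap : Int) : Decidable (Pre_clustalw sequences match_ mismatch gap) := by unfold Pre_clustalw; infer_instance

def pvWitness_clustalw : List String × Int × Int × Int := (["GATT", "GCTT", "GAT-"], 1, -1, -1)

def Spec_clustalw (sequences : List String) (match_ : Int) (mismatch : Int) (gap : Int) (out : String) : Prop := out = clustalw_alt sequences match_ mismatch gap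
instance (sequences : List String) (match_ : Int) (mismatch : Int) (gap : Int) (out : String) : Decidable (Spec_clustalw sequences match_ mismatch gap out) := by unfold Spec_clustalw; infer_instance

def Claim_equal_clustalw : Prop := ∀ (sequences : List String) (match_ : Int) (mismatch : Int) (gap : Int), Dom_clustalw sequences match_ mismatch gap → Pre_clustalw sequences match_ mismatch gap → Spec_clustalw sequences match_ mismatch gap (clustalw sequences match_ mismatch gap)

-- ===== LEMMAS AND PROOFS =====

def BInv (st : BState) : Prop :=
  (st.1.map (·.1)).Nodup ∧
  (∀ e ∈ st.1, e.1 < st.2.2) ∧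
  (∀ e₁ ∈ st.1, ∀ e₂ ∈ st.1, e₁.1 ≠ e₂.1 →
    st.2.1.getD (e₁.1, e₂.1) 0 = pairScoreB e₁.2 e₂.2)

theorem pairScoreB_comm (s t : List Char) : pairScoreB s t = pairScoreB t s := by
  induction s generalizing t with
  | nil => cases t <;> rfl
  | cons a s ih =>
    cases t with
    | nil => rfl
    | cons b t =>
      simp [pairScoreB, List.zip_cons_cons] at *
      rw [show ((if a = b then (1:Int) else 0) = if b = a then (1:Int) else 0) by
        by_cases h : a = b <;> simp [h, Ne.symm]]
      rw [ih t]

theorem refresh_cons (nid : Int) (seq : List Char) (r : Int × List Char) (es : List (Int × List Char)) (c : PySem.Dict (Int × Int) Int) :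
    refresh nid seq (r :: es) c = refresh nid seq es
      (if r.1 = nid then c else (c.insert (nid, r.1) (pairScoreB seq r.2)).insert (r.1, nid) (pairScoreB seq r.2)) := by
  simp [refresh]

theorem refresh_getD_skip (nid : Int) (seq : List Char) (entries : List (Int × List Char))
    (c : PySem.Dict (Int × Int) Int) (a b : Int) (ha : a ≠ nid) (hb : b ≠ nid) :
    (refresh nid seq entries c).getD (a, b) 0 = c.getD (a, b) 0 := by
  induction entries generalizing c with
  | nil => rfl
  | cons r es ih =>
    rw [refresh_cons]
    rw [ih]
    split_ifs with h
    · rfl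
    · rw [PySem.Dict.getD_insert, PySem.Dict.getD_insert]
      simp [Prod.ext_iff, ha, hb]

theorem refresh_getD_skip' (nid : Int) (seq : List Char) (entries : List (Int × List Char))
    (c : PySem.Dict (Int × Int) Int) (x : Int) (hx : x ∉ entries.map (·.1)) :
    (refresh nid seq entries c).getD (nid, x) 0 = c.getD (nid, x) 0 ∧
    (refresh nid seq entries c).getD (x, nid) 0 = c.getD (x, nid) 0 := by
  induction entries generalizing c with
  | nil => exact ⟨rfl, rfl⟩
  | cons r es ih =>
    simp only [List.map_cons, List.mem_cons, not_or] at hx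
    rw [refresh_cons]
    obtain ⟨ih1, ih2⟩ := ih (if r.1 = nid then c
      else (c.insert (nid, r.1) (pairScoreB seq r.2)).insert (r.1, nid) (pairScoreB seq r.2)) hx.2
    rw [ih1, ih2]
    have hrx : r.1 ≠ x := fun h => hx.1 h.symm
    constructor
    all_goals split_ifs with h
    · rfl
    · rw [PySem.Dict.getD_insert, PySem.Dict.getD_insert]
      simp [Prod.ext_iff, Ne.symm h, hrx.symm]
    · rfl
    · rw [PySem.Dict.getD_insert, PySem.Dict.getD_insert]
      simp [Prod.ext_iff, Ne.symm h, hrx.symm]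

theorem refresh_getD_hit (nid : Int) (seq : List Char) (entries : List (Int × List Char))
    (c : PySem.Dict (Int × Int) Int) (hnd : (entries.map (·.1)).Nodup)
    (e : Int × List Char) (he : e ∈ entries) (hne : e.1 ≠ nid) :
    (refresh nid seq entries c).getD (nid, e.1) 0 = pairScoreB seq e.2 ∧
    (refresh nid seq entries c).getD (e.1, nid) 0 = pairScoreB seq e.2 := by
  induction entries generalizing c with
  | nil => cases he
  | cons r es ih =>
    simp only [List.map_cons, List.nodup_cons] at hnd
    rcases List.mem_cons.1 he with rfl | he'
    · rw [refresh_cons]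
      have hx : e.1 ∉ es.map (·.1) := hnd.1
      rw [(refresh_getD_skip' nid seq es _ e.1 hx).1, (refresh_getD_skip' nid seq es _ e.1 hx).2]
      simp only [if_neg hne]
      rw [PySem.Dict.getD_insert, PySem.Dict.getD_insert, PySem.Dict.getD_insert]
      simp [Prod.ext_iff, hne, Ne.symm hne]
    · rw [refresh_cons]
      exact ih _ hnd.2 he'

def trip (al : List (List Char)) (pq : Nat × Nat) : Nat × Nat × Int :=
  (pq.1, pq.2, pairScoreB (al.getD pq.1 []) (al.getD pq.2 []))

theorem mem_pairsIdx {n : Nat} {pq : Nat × Nat} :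
    pq ∈ pairsIdx n ↔ pq.1 < pq.2 ∧ pq.2 < n := by
  unfold pairsIdx
  simp only [List.mem_flatMap, List.mem_map, List.mem_range, List.mem_range']
  constructor
  · rintro ⟨p, hp, q, ⟨i, hi, rfl⟩, rfl⟩
    omega
  · rintro ⟨h1, h2⟩
    exact ⟨pq.1, by omega, pq.2, ⟨pq.2 - (pq.1+1), by omega, by omega⟩, rfl⟩

theorem aScores_eq (al : List (List Char)) :
    aScores al = (pairsIdx al.length).map (trip al) := by
  unfold aScores pairsIdx
  rw [PySem.List.foldl_congr_mem _ _
    (fun sc i => sc ++ (List.range' (i+1) (al.length - (i+1))).map (fun j => trip al (i, j))) _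
    (by intro acc i _; rw [PySem.List.foldl_append_singleton_eq_map]; rfl)]
  rw [PySem.List.foldl_append_eq_flatMap]
  simp only [List.map_flatMap, List.map_map, List.nil_append]
  rfl

theorem bestPair_eq (E : List (Int × List Char)) (c : PySem.Dict (Int × Int) Int) (nxt : Int)
    (h : BInv (E, c, nxt)) :
    bestPair E c = PySem.List.max? (aScores (E.map (·.2))) (fun x => x.2.2) := by
  obtain ⟨hnd, hlt, hc⟩ := h
  rw [aScores_eq]
  simp only [List.length_map]
  rw [PySem.List.max?, List.foldl_map]
  unfold bestPair
  apply PySem.List.foldl_congr_mem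
  intro acc pq hpq
  obtain ⟨h1, h2⟩ := mem_pairsIdx.1 hpq
  have hp : pq.1 < E.length := lt_trans h1 h2
  have hq : pq.2 < E.length := h2
  have hEp : E.getD pq.1 (0, []) = E[pq.1] := List.getD_eq_getElem _ _ hp
  have hEq : E.getD pq.2 (0, []) = E[pq.2] := List.getD_eq_getElem _ _ hq
  have hals : ∀ (k : Nat) (hk : k < E.length), (E.map (·.2)).getD k [] = E[k].2 := by
    intro k hk
    rw [List.getD_eq_getElem _ _ (by simpa using hk), List.getElem_map]
  have hids : E[pq.1].1 ≠ E[pq.2].1 := by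
    intro hEq2
    have h1' : (E.map (·.1))[pq.1]'(by simpa using hp) = (E.map (·.1))[pq.2]'(by simpa using hq) := by
      simpa using hEq2
    have := (List.Nodup.getElem_inj_iff hnd).1 h1'
    omega
  have hscore : c.getD (E[pq.1].1, E[pq.2].1) 0 = pairScoreB E[pq.1].2 E[pq.2].2 :=
    hc _ (List.getElem_mem hp) _ (List.getElem_mem hq) hids
  simp only [hEp, hEq, trip, hals pq.1 hp, hals pq.2 hq, hscore]
  cases acc <;> rfl

theorem map_getD_zero (l : List (Int × List Char)) :
    (l.map (·.2)).getD 0 [] = (l.getD 0 (0, [])).2 := by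
  cases l <;> rfl

theorem bStep_rel (st : BState) (h : BInv st) :
    (bStep st).1.map (·.2) = aStep (st.1.map (·.2)) ∧ BInv (bStep st) := by
  obtain ⟨E, c, nxt⟩ := st
  obtain ⟨hnd, hlt, hc⟩ := h
  dsimp only at hnd hlt hc
  dsimp only [bStep, aStep]
  rw [bestPair_eq E c nxt ⟨hnd, hlt, hc⟩]
  rcases hmax : PySem.List.max? (aScores (E.map (·.2))) (fun x => x.2.2) with _ | ⟨p, q, s⟩
  · rw [hmax]
    exact ⟨rfl, ⟨hnd, hlt, hc⟩⟩
  rw [hmax]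
  dsimp only
  have hmem := PySem.List.max?_mem hmax
  rw [aScores_eq] at hmem
  obtain ⟨pq, hpq, htrip⟩ := List.mem_map.1 hmem
  obtain ⟨h1, h2⟩ := mem_pairsIdx.1 hpq
  simp only [List.length_map] at h2
  have hpE : p = pq.1 := by have := congrArg (·.1) htrip; simpa using this.symm
  have hqE : q = pq.2 := by have := congrArg (·.2.1) htrip; simpa using this.symm
  subst hpE; subst hqE
  have hp : pq.1 < E.length := lt_trans h1 h2
  have hq : pq.2 < E.length := h2
  have hals : ∀ (k : Nat) (hk : k < E.length), (E.map (·.2)).getD k [] = E[k].2 := by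
    intro k hk
    rw [List.getD_eq_getElem _ _ (by simpa using hk), List.getElem_map]
  have hEp : E.getD pq.1 (0, []) = E[pq.1] := List.getD_eq_getElem _ _ hp
  have hEq : E.getD pq.2 (0, []) = E[pq.2] := List.getD_eq_getElem _ _ hq
  -- the merged sequences agree
  have hmerged :
      (((E.getD pq.1 (0, [])).2).zip ((E.getD pq.2 (0, [])).2)).map
          (fun ab => if ab.1 = ab.2 then ab.1 else '-') =
      (((E.map (·.2)).getD pq.1 []).zip ((E.map (·.2)).getD pq.2 [])).map
          (fun ab => if ab.1 = ab.2 then ab.1 else '-') := by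
    rw [hEp, hEq, hals pq.1 hp, hals pq.2 hq]
  set merged := (((E.getD pq.1 (0, [])).2).zip ((E.getD pq.2 (0, [])).2)).map
      (fun ab => if ab.1 = ab.2 then ab.1 else '-') with hmdef
  have hnxt_notmem : nxt ∉ E.map (·.1) := by
    intro hmem'
    obtain ⟨e, he, he1⟩ := List.mem_map.1 hmem'
    exact absurd (he1 ▸ hlt e he) (lt_irrefl _)
  -- the new entry list
  set E' := (E.set pq.1 (nxt, merged)).eraseIdx pq.2 with hE'def
  have hmap2 : E'.map (·.2) = ((E.map (·.2)).set pq.1 merged).eraseIdx pq.2 := by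
    rw [hE'def, ← List.eraseIdx_map, List.map_set]
  have hmap1 : E'.map (·.1) = ((E.map (·.1)).set pq.1 nxt).eraseIdx pq.2 := by
    rw [hE'def, ← List.eraseIdx_map, List.map_set]
  have hnd' : (E'.map (·.1)).Nodup := by
    rw [hmap1]
    exact ((List.eraseIdx_sublist _ _).nodup (List.Nodup.set hnd hnxt_notmem))
  -- membership facts about E'
  have hmemE' : ∀ e ∈ E', e = (nxt, merged) ∨ (e ∈ E ∧ e.1 < nxt) := by
    intro e he
    rcases List.mem_or_eq_of_mem_set (List.mem_of_mem_eraseIdx he) with h' | h'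
    · exact Or.inr ⟨h', hlt e h'⟩
    · exact Or.inl h'
  refine ⟨?_, hnd', ?_, ?_⟩
  · simp [hmap2, hmerged]
  · dsimp only
    intro e he
    rcases hmemE' e he with rfl | ⟨_, h'⟩
    · exact lt_add_one _
    · omega
  · intro e₁ he₁ e₂ he₂ hne
    rcases hmemE' e₁ he₁ with rfl | ⟨hm₁, hl₁⟩
    · rcases hmemE' e₂ he₂ with rfl | ⟨hm₂, hl₂⟩
      · exact absurd rfl hne
      · have := (refresh_getD_hit nxt merged E' c hnd' e₂ he₂ (by omega)).1
        exact this
    · rcases hmemE' e₂ he₂ with rfl | ⟨hm₂, hl₂⟩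
      · have := (refresh_getD_hit nxt merged E' c hnd' e₁ he₁ (by omega)).2
        rw [this]
        exact (pairScoreB_comm _ _)
      · rw [refresh_getD_skip nxt merged E' c e₁.1 e₂.1 (by omega) (by omega)]
        exact hc e₁ hm₁ e₂ hm₂ hne

theorem bLoop_rel (f : Nat) (st : BState) (h : BInv st) :
    (bLoop f st).1.map (·.2) = aLoop f (st.1.map (·.2)) := by
  induction f generalizing st with
  | zero => rfl
  | succ f ih =>
    rw [bLoop, aLoop]
    simp only [List.length_map]
    split_ifs with hlen
    · rfl
    · obtain ⟨hm, hinv⟩ := bStep_rel st h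
      rw [ih (bStep st) hinv, hm]

theorem bInit_fold (ss : List String) (st : BState) (h : BInv st) :
    BInv (ss.foldl (fun st s =>
      (st.1 ++ [(st.2.2, s.toList)], refresh st.2.2 s.toList st.1 st.2.1, st.2.2 + 1)) st) ∧
    (ss.foldl (fun st s =>
      (st.1 ++ [(st.2.2, s.toList)], refresh st.2.2 s.toList st.1 st.2.1, st.2.2 + 1)) st).1.map (·.2)
      = st.1.map (·.2) ++ ss.map (fun s => s.toList) := by
  induction ss generalizing st with
  | nil => exact ⟨h, by simp⟩
  | cons s ss ih =>
    obtain ⟨E, c, nxt⟩ := st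
    obtain ⟨hnd, hlt, hc⟩ := h
    dsimp only at hnd hlt hc
    have hnxt_notmem : nxt ∉ E.map (·.1) := by
      intro hmem'
      obtain ⟨e, he, he1⟩ := List.mem_map.1 hmem'
      exact absurd (he1 ▸ hlt e he) (lt_irrefl _)
    have hst' : BInv (E ++ [(nxt, s.toList)], refresh nxt s.toList E c, nxt + 1) := by
      dsimp only [BInv]
      refine ⟨?_, ?_, ?_⟩
      · simp only [List.map_append, List.map_cons, List.map_nil]
        rw [List.nodup_append]
        refine ⟨hnd, List.nodup_singleton _, ?_⟩
        intro a ha b hb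
        simp only [List.mem_singleton] at hb
        subst hb
        exact fun h => hnxt_notmem (h ▸ ha)
      · intro e he
        rcases List.mem_append.1 he with h' | h'
        · have := hlt e h'; omega
        · simp only [List.mem_singleton] at h'
          subst h'
          exact lt_add_one _
      · intro e₁ he₁ e₂ he₂ hne
        rcases List.mem_append.1 he₁ with h₁ | h₁ <;> rcases List.mem_append.1 he₂ with h₂ | h₂
        · rw [refresh_getD_skip nxt s.toList E c e₁.1 e₂.1
            (by have := hlt e₁ h₁; omega) (by have := hlt e₂ h₂; omega)]
          exact hc e₁ h₁ e₂ h₂ hne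
        · simp only [List.mem_singleton] at h₂
          subst h₂
          have := (refresh_getD_hit nxt s.toList E c hnd e₁ h₁ (by have := hlt e₁ h₁; omega)).2
          rw [this]
          exact (pairScoreB_comm _ _)
        · simp only [List.mem_singleton] at h₁
          subst h₁
          have := (refresh_getD_hit nxt s.toList E c hnd e₂ h₂ (by have := hlt e₂ h₂; omega)).1
          exact this
        · simp only [List.mem_singleton] at h₁ h₂
          subst h₁; subst h₂
          exact absurd rfl hne
    obtain ⟨hi, hm⟩ := ih _ hst'
    refine ⟨by simpa using hi, ?_⟩
    simp only [List.foldl_cons]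
    rw [hm]  -- may need shape adjustment
    simp

theorem bInit_spec (sequences : List String) :
    BInv (bInit sequences) ∧ (bInit sequences).1.map (·.2) = sequences.map (fun s => s.toList) := by
  have h := bInit_fold sequences ([], PySem.Dict.empty, 0)
    ⟨List.nodup_nil, by simp, by simp⟩
  unfold bInit
  exact ⟨h.1, by simpa using h.2⟩

-- ===== VERDICT =====
theorem clustalw_spec : Claim_equal_clustalw := by
  intro sequences match_ mismatch gap _ _
  unfold Spec_clustalw clustalw clustalw_alt
  obtain ⟨hinv, hmap⟩ := bInit_spec sequences
  have hlen : (bInit sequences).1.length = (sequences.map (fun s => s.toList)).length := by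
    rw [← hmap, List.length_map]
  have h := bLoop_rel (bInit sequences).1.length (bInit sequences) hinv
  rw [hmap, hlen] at h
  simp only
  rw [← map_getD_zero, hlen, h]
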